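-- pv_equiv track=rewrite | github.com/ForrestT/work-scripts | cisco/portchannels/portchannel2.py | build_portchannel
-- ===== SOURCE A (Python) =====
-- def build_portchannel(vlans):
-- 	native, data, voice = '', '', ''
-- 	for line in vlans:
-- 		if 'native' in line.lower():
-- 			native = line.split()[0]
-- 		if 'data' in line.lower():
-- 			data = line.split()[0]
-- 		if 'voice' in line.lower():
-- 			voice = line.split()[0]
-- 			break
-- 	po_config = ['int po1',
-- 				'desc to bl-sw-dist-vss-1',
-- 				'switchport trunk encapsulation dot1q',
-- 				'switchport trunk native vlan {N}'.format(N=native),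
-- 				'switchport trunk allowed vlan {D},{V}'.format(D=data,V=voice),
-- 				'switchport mode trunk']
-- 	return po_config
-- ===== SOURCE B (Python) =====
-- def build_portchannel(vlans):
--     # locate the boundary (first 'voice' line), then extract from the restricted list
--     idx = next((i for i, l in enumerate(vlans) if 'voice' in l.lower()), None)
--     if idx is None:
--         scope, voice = vlans, ''
--     else:
--         scope = vlans[:idx + 1]
--         voice = scope[-1].split()[0]
--     native = next((l.split()[0] for l in reversed(scope) if 'native' in l.lower()), '')
--     data = next((l.split()[0] for l in reversed(scope) if 'data' in l.lower()), '')
--     return ['int po1',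
--             'desc to bl-sw-dist-vss-1',
--             'switchport trunk encapsulation dot1q',
--             'switchport trunk native vlan {N}'.format(N=native),
--             'switchport trunk allowed vlan {D},{V}'.format(D=data, V=voice),
--             'switchport mode trunk']
-- ===== Notes on version B (the rewrite author's own statement) =====
-- stated objective: alternative
-- what changed: Replaces A's single interleaved scan-with-break carrying three accumulators by a locate-boundary-then-extract decomposition: first find the index of the first 'voice' line, restrict to lines[:idx+1], then take the last 'native' and 'data' matches in that restricted list.
import Mathlib
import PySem

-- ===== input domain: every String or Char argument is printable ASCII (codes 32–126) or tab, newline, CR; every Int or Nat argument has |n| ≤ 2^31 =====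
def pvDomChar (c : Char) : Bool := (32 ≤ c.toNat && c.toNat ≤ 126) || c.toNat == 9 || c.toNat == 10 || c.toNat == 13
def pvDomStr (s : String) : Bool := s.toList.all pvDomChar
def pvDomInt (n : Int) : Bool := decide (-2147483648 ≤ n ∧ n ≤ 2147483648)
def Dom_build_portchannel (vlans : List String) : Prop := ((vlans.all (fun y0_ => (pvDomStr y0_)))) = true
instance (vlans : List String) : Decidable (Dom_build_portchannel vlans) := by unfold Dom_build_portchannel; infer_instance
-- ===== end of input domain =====

-- B replaces A's single interleaved scan-with-break by a locate-boundary-then-extract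
-- decomposition (find the first 'voice' line, restrict, then take last 'native'/'data'
-- matches); objective: alternative decomposition, same cost. Return value only; no mutation.

-- ===== PORT A =====
-- line.split()[0]; the .getD "" totalizes the index access — it is only evaluated when the
-- line contains a non-space substring, so the list is nonempty and the default never fires.
def pvTokA (line : String) : String := (PySem.List.pyGet? (PySem.Str.split₀ line) 0).getD ""

-- the for-loop with break, carrying (native, data, voice)
def pvLoopA : List String → String → String → String → String × String × String
  | [], n, d, v => (n, d, v)
  | line :: rest, n, d, v =>
    let n' := if PySem.Str.isIn "native" (PySem.Str.lower line) then pvTokA line else n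
    let d' := if PySem.Str.isIn "data" (PySem.Str.lower line) then pvTokA line else d
    if PySem.Str.isIn "voice" (PySem.Str.lower line) then (n', d', pvTokA line)
    else pvLoopA rest n' d' v

def build_portchannel (vlans : List String) : List String :=
  let s := pvLoopA vlans "" "" ""
  ["int po1",
   "desc to bl-sw-dist-vss-1",
   "switchport trunk encapsulation dot1q",
   "switchport trunk native vlan " ++ s.1,
   "switchport trunk allowed vlan " ++ s.2.1 ++ "," ++ s.2.2,
   "switchport mode trunk"]

-- ===== PORT B =====
def pvTokB (line : String) : String := (PySem.List.pyGet? (PySem.Str.split₀ line) 0).getD ""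

def pvHasB (sub line : String) : Bool := PySem.Str.isIn sub (PySem.Str.lower line)

-- native/data: first token of the last matching line of the scope (next over reversed(scope))
def pvLastTokB (scope : List String) (sub : String) : String :=
  match scope.reverse.find? (pvHasB sub) with
  | some l => pvTokB l
  | none => ""

def build_portchannel_alt (vlans : List String) : List String :=
  let idx := vlans.findIdx? (pvHasB "voice")
  let scope := match idx with
    | some i => vlans.take (i + 1)
    | none => vlans
  let voice := match idx with
    | some _ => pvTokB (scope.getLastD "")
    | none => ""
  let native := pvLastTokB scope "native"
  let data := pvLastTokB scope "data"
  ["int po1",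
   "desc to bl-sw-dist-vss-1",
   "switchport trunk encapsulation dot1q",
   "switchport trunk native vlan " ++ native,
   "switchport trunk allowed vlan " ++ data ++ "," ++ voice,
   "switchport mode trunk"]

-- ===== PRECONDITION & SPEC =====
def Spec_build_portchannel (vlans : List String) (out : List String) : Prop := out = build_portchannel_alt vlans
instance (vlans : List String) (out : List String) : Decidable (Spec_build_portchannel vlans out) := by unfold Spec_build_portchannel; infer_instance

-- ===== CLAIM (what is proved, stated in full; the proofs are below) =====
def Claim_equal_build_portchannel : Prop := ∀ (vlans : List String), Dom_build_portchannel vlans → Spec_build_portchannel vlans (build_portchannel vlans)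

-- ===== LEMMAS AND PROOFS =====

-- the scope B restricts to, and its accumulating extractors
def pvScope (vlans : List String) : List String :=
  match vlans.findIdx? (pvHasB "voice") with
  | some i => vlans.take (i + 1)
  | none => vlans

def pvLastTokD (scope : List String) (sub dflt : String) : String :=
  match scope.reverse.find? (pvHasB sub) with
  | some l => pvTokB l
  | none => dflt

def pvVoiceOf (vlans : List String) (v : String) : String :=
  match vlans.findIdx? (pvHasB "voice") with
  | some i => pvTokB ((vlans.take (i + 1)).getLastD "")
  | none => v

theorem pvLastTokD_cons (x : String) (s : List String) (sub n : String) :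
    pvLastTokD (x :: s) sub n = pvLastTokD s sub (if pvHasB sub x then pvTokB x else n) := by
  unfold pvLastTokD
  rw [List.reverse_cons, List.find?_append]
  cases h : s.reverse.find? (pvHasB sub) with
  | some l => simp
  | none =>
    simp only [Option.none_or]
    by_cases hx : pvHasB sub x <;> simp [List.find?, hx]

theorem pvLoopA_eq (vlans : List String) (n d v : String) :
    pvLoopA vlans n d v =
      (pvLastTokD (pvScope vlans) "native" n,
       pvLastTokD (pvScope vlans) "data" d,
       pvVoiceOf vlans v) := by
  induction vlans generalizing n d v with
  | nil => simp [pvLoopA, pvScope, pvLastTokD, pvVoiceOf]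
  | cons x rest ih =>
    by_cases hv : pvHasB "voice" x
    · have hidx : (x :: rest).findIdx? (pvHasB "voice") = some 0 := by
        rw [List.findIdx?_cons]
        simp [hv]
      simp only [pvLoopA, pvScope, pvVoiceOf, hidx]
      have hx : PySem.Chars.isIn ['v','o','i','c','e'] (PySem.Chars.lower x.toList) = true := by
        simpa [pvHasB, PySem.Str.isIn, PySem.Str.lower] using hv
      by_cases hn : PySem.Chars.isIn ['n','a','t','i','v','e'] (PySem.Chars.lower x.toList) <;>
        by_cases hd : PySem.Chars.isIn ['d','a','t','a'] (PySem.Chars.lower x.toList) <;>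
        simp [hx, hn, hd, pvLastTokD, pvTokA, pvTokB, pvHasB, PySem.Str.isIn, PySem.Str.lower]
    · have hidx : (x :: rest).findIdx? (pvHasB "voice") =
          (rest.findIdx? (pvHasB "voice")).map (· + 1) := by
        rw [List.findIdx?_cons]
        simp [hv]
      have hx : PySem.Str.isIn "voice" (PySem.Str.lower x) = false := by
        simpa [pvHasB] using hv
      have hscope : pvScope (x :: rest) = x :: pvScope rest := by
        unfold pvScope
        rw [hidx]
        cases rest.findIdx? (pvHasB "voice") <;> simp
      have hvoice : ∀ v', pvVoiceOf (x :: rest) v' = pvVoiceOf rest v' := by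
        intro v'
        unfold pvVoiceOf
        rw [hidx]
        cases h : rest.findIdx? (pvHasB "voice") with
        | none => simp
        | some i =>
          have : i < rest.length := (List.findIdx?_eq_some_iff_findIdx_eq.mp h).1
          simp [List.take_succ_cons,
            List.getLastD_eq_getLast?, List.getLast?_eq_getElem?,
            List.length_take, Nat.min_eq_left (by omega : i + 1 ≤ rest.length)]
      simp only [pvLoopA, hx, if_false, Bool.false_eq_true, ih, hscope, hvoice,
        pvLastTokD_cons]
      refine Prod.ext ?_ (Prod.ext ?_ rfl)
      · by_cases hn : pvHasB "native" x <;> simp_all [pvHasB, pvTokA, pvTokB]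
      · by_cases hd : pvHasB "data" x <;> simp_all [pvHasB, pvTokA, pvTokB]

-- ===== VERDICT (by name: the statement is the Claim_ definition above) =====
theorem build_portchannel_spec : Claim_equal_build_portchannel := by
  intro vlans _
  unfold Spec_build_portchannel build_portchannel build_portchannel_alt
  rw [pvLoopA_eq]
  unfold pvScope pvVoiceOf pvLastTokB pvLastTokD
  cases h : vlans.findIdx? (pvHasB "voice") <;> simp
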